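-- pv_equiv track=rewrite | github.com/tkoz0/problems-hackerrank | fair-rations.py | fairRations
-- ===== SOURCE A (Python) =====
-- def fairRations(B):
--     # Write your code here
--     if sum(B) % 2 == 1:
--         return 'NO'
--     B = [b % 2 == 0 for b in B]
--     ret = 0
--     for i in range(len(B)):
--         if i < len(B)-1:
--             if not B[i]:
--                 ret += 2
--                 B[i] = not B[i]
--                 B[i+1] = not B[i+1]
--         else:
--             assert B[i]
--     return str(ret)
-- ===== SOURCE B (Python) =====
-- def fairRations(B):
--     if sum(B) % 2 == 1:
--         return 'NO'
--     odds = [i for i, b in enumerate(B) if b % 2 != 0]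
--     it = iter(odds)
--     total = sum(2 * (j - i) for i, j in zip(it, it))
--     return str(total)
-- ===== Notes on version B (the rewrite author's own statement) =====
-- stated objective: simpler
-- what changed: Replaces the flip-simulation over a mutable parity array with a closed-form pairing of the odd positions: collect indices of odd loaves once, then sum 2*(gap) over consecutive pairs; B never mutates state.
import Mathlib
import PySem

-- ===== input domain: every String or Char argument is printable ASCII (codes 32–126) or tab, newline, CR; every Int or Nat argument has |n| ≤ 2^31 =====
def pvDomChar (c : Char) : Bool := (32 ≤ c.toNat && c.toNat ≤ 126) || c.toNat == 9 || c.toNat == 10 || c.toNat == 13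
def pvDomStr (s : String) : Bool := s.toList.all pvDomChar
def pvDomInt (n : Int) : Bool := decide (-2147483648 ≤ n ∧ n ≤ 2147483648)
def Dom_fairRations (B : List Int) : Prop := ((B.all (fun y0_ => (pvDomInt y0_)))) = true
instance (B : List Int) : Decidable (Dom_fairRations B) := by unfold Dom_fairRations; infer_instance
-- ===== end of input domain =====

-- B replaces A's flip-simulation over a mutable parity list with a direct pairing of the
-- odd positions (same O(n) cost, no mutation); equivalence is proved on all inputs.

-- ===== PORT A =====
-- A's loop over indices i flips only B[i] (never read again) and B[i+1]; the structural
-- recursion below carries the same state: the remaining suffix with its head possibly flipped.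
def fairLoop : List Bool → Int
  | [] => 0
  | [_] => 0                    -- last index: only the assert (never failing under the guard)
  | b :: c :: rest => if !b then 2 + fairLoop ((!c) :: rest) else fairLoop (c :: rest)

def fairRations (B : List Int) : String :=
  if PySem.Int.mod B.sum 2 = 1 then "NO"
  else PySem.Int.toStr (fairLoop (B.map (fun b => PySem.Int.mod b 2 == 0)))

-- ===== PORT B =====
-- port of the pairing sum: zip(it, it) consumes the odd positions two at a time
def pairGaps : List Int → Int
  | i :: j :: rest => 2 * (j - i) + pairGaps rest
  | _ => 0

def fairRations_alt (B : List Int) : String :=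
  if PySem.Int.mod B.sum 2 = 1 then "NO"
  else PySem.Int.toStr (pairGaps
    (((PySem.List.enumerate B).filter (fun p => PySem.Int.mod p.2 2 != 0)).map Prod.fst))

-- ===== PRECONDITION & SPEC =====
def Spec_fairRations (B : List Int) (out : String) : Prop := out = fairRations_alt B
instance (B : List Int) (out : String) : Decidable (Spec_fairRations B out) := by unfold Spec_fairRations; infer_instance

-- ===== CLAIM (what is proved, stated in full; the proofs are below) =====
def Claim_equal_fairRations : Prop := ∀ (B : List Int), Dom_fairRations B → Spec_fairRations B (fairRations B)

-- ===== LEMMAS AND PROOFS =====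

theorem pymod_two (a : Int) : PySem.Int.mod a 2 = a % 2 := by simp

-- indices (from offset k) of the `false` entries of a Bool list
def falseIdx : List Bool → Int → List Int
  | [], _ => []
  | b :: t, k => if b then falseIdx t (k + 1) else k :: falseIdx t (k + 1)

theorem falseIdx_nil_iff (l : List Bool) (k : Int) :
    falseIdx l k = [] ↔ l.count false = 0 := by
  induction l generalizing k with
  | nil => simp [falseIdx]
  | cons b t ih =>
    cases b <;> simp [falseIdx, ih]

theorem count_false_even_of_parity :
    ∀ (l : List Bool), Even (l.count false) → ∀ k : Int, fairLoop l = pairGaps (falseIdx l k)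
  | [], _, k => by simp [fairLoop, falseIdx, pairGaps]
  | [b], h, k => by
    cases b with
    | false => norm_num [List.count_cons] at h
    | true => simp [fairLoop, falseIdx, pairGaps]
  | true :: c :: rest, h, k => by
    have h' : Even ((c :: rest).count false) := by simpa [List.count_cons] using h
    rw [show fairLoop (true :: c :: rest) = fairLoop (c :: rest) from by simp [fairLoop]]
    rw [count_false_even_of_parity (c :: rest) h' (k + 1)]
    simp [falseIdx]
  | false :: false :: rest, h, k => by
    have h' : Even ((true :: rest).count false) := by
      simp only [Nat.even_iff] at h ⊢
      simp at h ⊢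
      omega
    rw [show fairLoop (false :: false :: rest) = 2 + fairLoop (true :: rest) from by
      simp [fairLoop]]
    rw [count_false_even_of_parity (true :: rest) h' (k + 1)]
    simp [falseIdx, pairGaps]
    try ring
  | false :: true :: rest, h, k => by
    have hodd : rest.count false % 2 = 1 := by
      simp only [Nat.even_iff] at h
      simp at h
      omega
    have h' : Even ((false :: rest).count false) := by
      simp only [Nat.even_iff]
      simp
      omega
    have hne : falseIdx rest (k + 1 + 1) ≠ [] := by
      rw [Ne, falseIdx_nil_iff]
      omega
    obtain ⟨j, more, hjm⟩ : ∃ j more, falseIdx rest (k + 1 + 1) = j :: more := by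
      rcases hrest : falseIdx rest (k + 1 + 1) with _ | ⟨j, more⟩
      · exact absurd hrest hne
      · exact ⟨j, more, rfl⟩
    rw [show fairLoop (false :: true :: rest) = 2 + fairLoop (false :: rest) from by
      simp [fairLoop]]
    rw [count_false_even_of_parity (false :: rest) h' (k + 1)]
    simp [falseIdx, hjm, pairGaps]
    try ring
termination_by l => l.length
decreasing_by all_goals simp

theorem falseIdx_enumerate (B : List Int) (k : Int) :
    ((PySem.List.enumerate B k).filter (fun p => PySem.Int.mod p.2 2 != 0)).map Prod.fst
      = falseIdx (B.map (fun b => PySem.Int.mod b 2 == 0)) k := by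
  induction B generalizing k with
  | nil => simp [PySem.List.enumerate_nil, falseIdx]
  | cons b t ih =>
    have ih' := ih (k + 1)
    simp only [pymod_two] at ih'
    rcases Int.emod_two_eq b with hb | hb
    · simp [PySem.List.enumerate_cons, falseIdx, hb, ih']
    · simp [PySem.List.enumerate_cons, falseIdx, hb, ih']

theorem parity_count (B : List Int) (h : ¬ PySem.Int.mod B.sum 2 = 1) :
    Even ((B.map (fun b => PySem.Int.mod b 2 == 0)).count false) := by
  rw [pymod_two] at h
  have key : ∀ (L : List Int),
      ((L.map (fun b => PySem.Int.mod b 2 == 0)).count false : Int) % 2 = L.sum % 2 := by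
    intro L
    induction L with
    | nil => simp
    | cons b t ih =>
      simp only [pymod_two] at ih ⊢
      rcases Int.emod_two_eq b with hb | hb
      · have hbt : ((b : Int) % 2 == 0) = true := by simp [hb]
        simp only [List.map_cons, List.count_cons, hbt, List.sum_cons]
        simp
        omega
      · have hbt : ((b : Int) % 2 == 0) = false := by simp [hb]
        simp only [List.map_cons, List.count_cons, hbt, List.sum_cons]
        simp
        omega
  have hk := key B
  rw [Nat.even_iff]
  omega

-- ===== VERDICT (by name: the statement is the Claim_ definition above) =====
theorem fairRations_spec : Claim_equal_fairRations := by
  intro B _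
  unfold Spec_fairRations fairRations fairRations_alt
  by_cases hg : PySem.Int.mod B.sum 2 = 1
  · rw [if_pos hg, if_pos hg]
  · rw [if_neg hg, if_neg hg, falseIdx_enumerate B 0,
      ← count_false_even_of_parity _ (parity_count B hg) 0]
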